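-- pv_equiv track=rewrite | github.com/EnricLG/ACS | src/phase3_concentric_rotations.py | _extract_border
-- ===== SOURCE A (Python) =====
-- def _extract_border(grid, top, left, size):
--     """Extract the border of a square in clockwise order."""
--     border = []
--     # top edge
--     for j in range(left, left + size):
--         border.append(grid[top][j])
--     # right edge
--     for i in range(top + 1, top + size):
--         border.append(grid[i][left + size - 1])
--     # bottom edge (right to left)
--     for j in range(left + size - 2, left - 1, -1):
--         border.append(grid[top + size - 1][j])
--     # left edge (bottom to top)
--     for i in range(top + size - 2, top, -1):
--         border.append(grid[i][left])
--     return border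
-- ===== SOURCE B (Python) =====
-- def _extract_border(grid, top, left, size):
--     """Extract the border of a square in clockwise order via a single direction-vector walk."""
--     if size <= 0:
--         return []
--     r, c = top, left
--     dr, dc = 0, 1
--     out = [grid[r][c]]
--     # runs: right, down, left each size-1 steps; up size-2 steps (clamped),
--     # so the starting corner is not revisited
--     for run in (size - 1, size - 1, size - 1, max(size - 2, 0)):
--         for _ in range(run):
--             r += dr
--             c += dc
--             out.append(grid[r][c])
--         dr, dc = dc, -dr
--     return out
-- ===== Notes on version B (the rewrite author's own statement) =====
-- stated objective: alternative
-- what changed: Replaced A's four separate hard-coded edge loops (top, right, bottom-reversed, left-reversed with per-edge index formulas) by a single stateful clockwise walk: one position and one direction vector, four runs with the direction rotated clockwise after each run.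
import Mathlib
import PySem

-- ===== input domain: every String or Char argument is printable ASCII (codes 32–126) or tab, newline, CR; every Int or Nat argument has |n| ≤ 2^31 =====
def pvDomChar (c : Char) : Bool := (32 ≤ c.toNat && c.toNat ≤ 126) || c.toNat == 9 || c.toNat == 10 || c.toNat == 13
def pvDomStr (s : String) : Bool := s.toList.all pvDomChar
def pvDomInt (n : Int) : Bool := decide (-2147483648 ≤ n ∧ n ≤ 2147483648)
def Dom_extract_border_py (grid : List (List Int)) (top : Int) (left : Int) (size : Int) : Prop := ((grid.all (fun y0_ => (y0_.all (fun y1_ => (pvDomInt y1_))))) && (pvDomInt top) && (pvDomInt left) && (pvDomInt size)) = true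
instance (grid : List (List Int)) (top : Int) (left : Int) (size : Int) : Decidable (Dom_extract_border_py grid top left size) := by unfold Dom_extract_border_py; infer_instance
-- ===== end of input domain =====

-- B replaces A's four fixed edge loops by a single stateful clockwise direction-vector walk (alternative decomposition, same cost).


-- shared indexing helper: grid[r][c] with Python index semantics (total under Pre_)
def pvCell (grid : List (List Int)) (r c : Int) : Int :=
  PySem.List.pyGetD (PySem.List.pyGetD grid r []) c 0

-- ===== PORT A =====
def extract_border_py (grid : List (List Int)) (top : Int) (left : Int) (size : Int) : List Int :=
  let border : List Int := []
  -- top edge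
  let border := (PySem.List.pyRange left (left + size) 1).foldl
    (fun b j => b ++ [pvCell grid top j]) border
  -- right edge
  let border := (PySem.List.pyRange (top + 1) (top + size) 1).foldl
    (fun b i => b ++ [pvCell grid i (left + size - 1)]) border
  -- bottom edge (right to left)
  let border := (PySem.List.pyRange (left + size - 2) (left - 1) (-1)).foldl
    (fun b j => b ++ [pvCell grid (top + size - 1) j]) border
  -- left edge (bottom to top)
  let border := (PySem.List.pyRange (top + size - 2) top (-1)).foldl
    (fun b i => b ++ [pvCell grid i left]) border
  border

-- ===== PORT B =====
-- one run: take n steps in direction (dr,dc) from (r,c), collecting each newly-entered cell; returns cells and final position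
def pvWalkRun (grid : List (List Int)) (r c dr dc : Int) : Nat → List Int × Int × Int
  | 0 => ([], r, c)
  | n + 1 =>
    let r' := r + dr
    let c' := c + dc
    let rest := pvWalkRun grid r' c' dr dc n
    (pvCell grid r' c' :: rest.1, rest.2)

-- the four runs, rotating the direction clockwise after each run
def pvWalkEdges (grid : List (List Int)) (r c dr dc : Int) : List Nat → List Int
  | [] => []
  | n :: ns =>
    let res := pvWalkRun grid r c dr dc n
    res.1 ++ pvWalkEdges grid res.2.1 res.2.2 dc (-dr) ns

def extract_border_py_alt (grid : List (List Int)) (top : Int) (left : Int) (size : Int) : List Int :=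
  if size ≤ 0 then []
  else
    pvCell grid top left ::
      pvWalkEdges grid top left 0 1
        [(size - 1).toNat, (size - 1).toNat, (size - 1).toNat, (size - 2).toNat]

-- ===== PRECONDITION & SPEC =====
-- Pre_: every (row, column) index pair the border touches is in range for Python
-- indexing (InRange allows negative wraparound); outside Pre_ Python raises IndexError.
def Pre_extract_border_py (grid : List (List Int)) (top : Int) (left : Int) (size : Int) : Prop :=
  1 ≤ size →
    (PySem.Raise.InRange grid.length top ∧
      PySem.Raise.InRange grid.length (top + size - 1) ∧
      (∀ i ∈ PySem.List.pyRange (top + 1) (top + size) 1, PySem.Raise.InRange grid.length i)) ∧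
    (∀ j ∈ PySem.List.pyRange left (left + size) 1,
        PySem.Raise.InRange (PySem.List.pyGetD grid top []).length j ∧
        PySem.Raise.InRange (PySem.List.pyGetD grid (top + size - 1) []).length j) ∧
    (∀ i ∈ PySem.List.pyRange (top + 1) (top + size) 1,
        PySem.Raise.InRange (PySem.List.pyGetD grid i []).length (left + size - 1) ∧
        PySem.Raise.InRange (PySem.List.pyGetD grid i []).length left)

instance (grid : List (List Int)) (top : Int) (left : Int) (size : Int) : Decidable (Pre_extract_border_py grid top left size) := by
  unfold Pre_extract_border_py; infer_instance

def pvWitness_extract_border_py : List (List Int) × Int × Int × Int :=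
  ([[1, 2, 3], [4, 5, 6], [7, 8, 9]], 0, 0, 3)

def Spec_extract_border_py (grid : List (List Int)) (top : Int) (left : Int) (size : Int) (out : List Int) : Prop := out = extract_border_py_alt grid top left size
instance (grid : List (List Int)) (top : Int) (left : Int) (size : Int) (out : List Int) : Decidable (Spec_extract_border_py grid top left size out) := by unfold Spec_extract_border_py; infer_instance

-- ===== CLAIM (what is proved, stated in full; the proofs are below) =====
def Claim_equal_extract_border_py : Prop := ∀ (grid : List (List Int)) (top : Int) (left : Int) (size : Int), Dom_extract_border_py grid top left size → Pre_extract_border_py grid top left size → Spec_extract_border_py grid top left size (extract_border_py grid top left size)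

-- ===== LEMMAS AND PROOFS =====

theorem pvWalkRun_eq (grid : List (List Int)) (dr dc : Int) (n : Nat) :
    ∀ r c, pvWalkRun grid r c dr dc n =
      ((List.range n).map (fun (k : Nat) => pvCell grid (r + ((k : Int) + 1) * dr) (c + ((k : Int) + 1) * dc)),
        r + (n : Int) * dr, c + (n : Int) * dc) := by
  induction n with
  | zero => intro r c; simp [pvWalkRun]
  | succ n ih =>
    intro r c
    simp only [pvWalkRun, ih, Prod.mk.injEq, List.range_succ_eq_map, List.map_cons, List.map_map]
    refine ⟨?_, by push_cast; ring, by push_cast; ring⟩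
    congr 1
    · norm_num
    · apply List.map_congr_left
      intro k _
      simp only [Function.comp_apply]
      congr 1 <;> push_cast <;> ring

theorem extract_border_eq (grid : List (List Int)) (top left size : Int) :
    extract_border_py grid top left size = extract_border_py_alt grid top left size := by
  by_cases hs : size ≤ 0
  · have h1 : PySem.List.pyRange left (left + size) 1 = [] :=
      PySem.List.pyRange_one_eq_nil (by omega)
    have h2 : PySem.List.pyRange (top + 1) (top + size) 1 = [] :=
      PySem.List.pyRange_one_eq_nil (by omega)
    have h3 : PySem.List.pyRange (left + size - 2) (left - 1) (-1) = [] :=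
      PySem.List.pyRange_neg_one_eq_nil (by omega)
    have h4 : PySem.List.pyRange (top + size - 2) top (-1) = [] :=
      PySem.List.pyRange_neg_one_eq_nil (by omega)
    simp [extract_border_py, extract_border_py_alt, h1, h2, h3, h4, hs]
  · have hn : ((size - 1).toNat : Int) = size - 1 := by omega
    simp only [extract_border_py, extract_border_py_alt, if_neg hs,
      PySem.List.foldl_append_singleton_eq_map, List.nil_append,
      PySem.List.pyRange_one, PySem.List.pyRange_neg_one, List.map_map,
      pvWalkEdges, pvWalkRun_eq]
    simp only [List.append_assoc, List.append_nil, hn]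
    have e1 : (left + size - left).toNat = (size - 1).toNat + 1 := by omega
    have e2 : (top + size - (top + 1)).toNat = (size - 1).toNat := by omega
    have e3 : (left + size - 2 - (left - 1)).toNat = (size - 1).toNat := by omega
    have e4 : (top + size - 2 - top).toNat = (size - 2).toNat := by omega
    rw [e1, e2, e3, e4, List.range_succ_eq_map]
    simp only [List.map_cons, List.map_map, List.cons_append]
    congr 1
    · simp
    congr 1
    · apply List.map_congr_left; intro k _; simp only [Function.comp_apply]
      congr 1 <;> omega
    congr 1
    · apply List.map_congr_left; intro k _; simp only [Function.comp_apply]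
      congr 1 <;> omega
    congr 1
    · apply List.map_congr_left; intro k _; simp only [Function.comp_apply]
      congr 1 <;> omega
    · apply List.map_congr_left; intro k _; simp only [Function.comp_apply]
      congr 1 <;> omega

-- ===== VERDICT (by name: the statement is the Claim_ definition above) =====
theorem extract_border_py_spec : Claim_equal_extract_border_py := by
  intro grid top left size _ _
  unfold Spec_extract_border_py
  exact extract_border_eq grid top left size
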